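-- pv_equiv track=rewrite | github.com/petarivanovv9/Python101-and-Algo1-Courses | Algo-1/Application/1-Palindromes.py | generate_rotations
-- ===== SOURCE A (Python) =====
-- def generate_rotations(word):
--     letters = list(word)
--     string_rotations = []
--     counter = len(letters)
--
--     temp = letters
--     while counter != 0:
--         current_letter = temp.pop(0)
--         temp.append(current_letter)
--         word = "".join(temp)
--         string_rotations.append(word)
--         counter -= 1
--
--     return string_rotations
-- ===== SOURCE B (Python) =====
-- def generate_rotations(word):
--     n = len(word)
--     doubled = word + word
--     return [doubled[i + 1:i + 1 + n] for i in range(n)]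
-- ===== Notes on version B (the rewrite author's own statement) =====
-- stated objective: faster
-- what changed: Replaces A's mutating pop-from-front/append-to-back rotating buffer (rebuilt and re-joined each iteration) with the doubled-string trick: each rotation is a single slice doubled[i+1:i+1+n] of word+word.
import Mathlib
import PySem

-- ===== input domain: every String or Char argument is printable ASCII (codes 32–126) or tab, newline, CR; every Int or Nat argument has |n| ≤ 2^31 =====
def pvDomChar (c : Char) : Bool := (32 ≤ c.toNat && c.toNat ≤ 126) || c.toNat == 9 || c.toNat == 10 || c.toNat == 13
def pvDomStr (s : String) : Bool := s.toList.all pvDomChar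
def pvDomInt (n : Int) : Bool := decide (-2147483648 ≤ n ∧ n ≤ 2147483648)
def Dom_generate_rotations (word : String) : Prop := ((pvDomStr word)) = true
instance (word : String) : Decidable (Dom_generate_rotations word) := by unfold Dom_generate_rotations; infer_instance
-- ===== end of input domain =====

-- B builds each rotation as one slice of the doubled word instead of A's mutating
-- rotating buffer (objective: faster, constant-factor); equal return values proved on Dom.
-- ===== PORT A =====
-- while loop of A: counter, rotating buffer temp, accumulator of joined strings
def generate_rotations_loop : Nat → List Char → List String → List String
  | 0, _, acc => acc
  | Nat.succ _, [], acc => acc   -- unreachable: counter starts at |temp| and |temp| is preserved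
  | Nat.succ k, c :: rest, acc =>
      let temp' := rest ++ [c]
      generate_rotations_loop k temp' (acc ++ [String.ofList temp'])

def generate_rotations (word : String) : List String :=
  let letters := word.toList
  generate_rotations_loop letters.length letters []

-- ===== PORT B =====
-- doubled-string trick: doubled[i+1 : i+1+n] = take n (drop (i+1) doubled) (nonnegative in-range slice)
def generate_rotations_alt (word : String) : List String :=
  let letters := word.toList
  let n := letters.length
  let doubled := letters ++ letters
  (List.range n).map (fun i => String.ofList ((doubled.drop (i + 1)).take n))

-- ===== PRECONDITION & SPEC =====
def Spec_generate_rotations (word : String) (out : List String) : Prop := out = generate_rotations_alt word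
instance (word : String) (out : List String) : Decidable (Spec_generate_rotations word out) := by unfold Spec_generate_rotations; infer_instance

-- ===== CLAIM (what is proved, stated in full; the proofs are below) =====
def Claim_equal_generate_rotations : Prop := ∀ (word : String), Dom_generate_rotations word → Spec_generate_rotations word (generate_rotations word)

-- ===== LEMMAS AND PROOFS =====

-- ===== VERDICT (by name: the statement is the Claim_ definition above) =====
-- Loop invariant: with counter k ≤ |temp|, the loop appends the k successive rotations of temp.
theorem generate_rotations_loop_eq (k : Nat) (temp : List Char) (acc : List String)
    (hk : k ≤ temp.length) :
    generate_rotations_loop k temp acc =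
      acc ++ (List.range k).map (fun i => String.ofList (temp.rotate (i + 1))) := by
  induction k generalizing temp acc with
  | zero => simp [generate_rotations_loop]
  | succ k ih =>
      cases temp with
      | nil => simp at hk
      | cons c rest =>
          have hk' : k ≤ (rest ++ [c]).length := by
            simp at hk ⊢; omega
          rw [generate_rotations_loop, ih (rest ++ [c]) _ hk',
              List.range_succ_eq_map]
          simp only [List.map_cons, List.map_map]
          have h1 : (c :: rest).rotate 1 = rest ++ [c] := by
            simp [List.rotate_cons_succ]
          simp [h1]

theorem generate_rotations_spec : Claim_equal_generate_rotations := by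
  intro word _
  unfold Spec_generate_rotations generate_rotations generate_rotations_alt
  rw [generate_rotations_loop_eq _ _ _ (le_refl _)]
  simp only [List.nil_append]
  apply List.map_congr_left
  intro i hi
  rw [List.mem_range] at hi
  rw [List.rotate_eq_drop_append_take (by omega)]
  have hd : (word.toList ++ word.toList).drop (i + 1) =
      word.toList.drop (i + 1) ++ word.toList :=
    List.drop_append_of_le_length (by omega)
  rw [hd]
  have hn : word.toList.length = (word.toList.drop (i + 1)).length + (i + 1) := by
    rw [List.length_drop]; omega
  rw [hn, List.take_append, List.take_of_length_le (Nat.le_add_right _ _), Nat.add_sub_cancel_left]
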